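-- pv_equiv track=rewrite | github.com/harjassand/AGI-Stack-Unchained | tools/polymath/polymath_domain_bootstrap_v1.py | normalize_domain_id
-- ===== SOURCE A (Python) =====
-- def normalize_domain_id(topic_name: str) -> str:
--     out = []
--     prev_sep = False
--     for ch in str(topic_name).strip().lower():
--         if ch.isalnum():
--             out.append(ch)
--             prev_sep = False
--             continue
--         if not prev_sep:
--             out.append("_")
--             prev_sep = True
--     slug = "".join(out).strip("_")
--     return slug or "domain_unknown"
-- ===== SOURCE B (Python) =====
-- def normalize_domain_id(topic_name: str) -> str:
--     text = str(topic_name).strip().lower()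
--     words = []
--     i, n = 0, len(text)
--     while i < n:
--         if text[i].isalnum():
--             j = i + 1
--             while j < n and text[j].isalnum():
--                 j += 1
--             words.append(text[i:j])
--             i = j
--         else:
--             i += 1
--     return "_".join(words) or "domain_unknown"
-- ===== Notes on version B (the rewrite author's own statement) =====
-- stated objective: alternative
-- what changed: replaces A's per-character state machine (prev_sep flag, emit separators then strip them from both ends) by a scanner that collects maximal alphanumeric runs as words and joins them with underscores, so separator characters are never emitted or stripped
import Mathlib
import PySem

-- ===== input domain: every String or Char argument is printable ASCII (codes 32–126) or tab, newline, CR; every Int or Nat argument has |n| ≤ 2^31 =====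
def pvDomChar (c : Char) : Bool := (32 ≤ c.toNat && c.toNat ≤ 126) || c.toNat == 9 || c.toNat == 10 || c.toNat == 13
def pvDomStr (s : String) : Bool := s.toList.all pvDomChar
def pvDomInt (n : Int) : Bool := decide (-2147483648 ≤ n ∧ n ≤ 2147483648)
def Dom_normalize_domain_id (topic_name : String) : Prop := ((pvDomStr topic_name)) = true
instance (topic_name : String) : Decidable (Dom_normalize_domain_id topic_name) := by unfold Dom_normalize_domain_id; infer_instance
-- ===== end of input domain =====

-- B differs only in structure: it collects maximal alphanumeric runs and joins them with underscores,
-- instead of A's per-character prev_sep state machine followed by stripping edge separators; same values.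

-- ===== PORT A =====
-- the loop body of A's for-loop: state = (out, prev_sep)
def aStep (acc : List Char × Bool) (ch : Char) : List Char × Bool :=
  if PySem.Chars.isalnum ch then (acc.1 ++ [ch], false)
  else if !acc.2 then (acc.1 ++ ['_'], true)
  else acc

def normalize_domain_id (topic_name : String) : String :=
  let st := (PySem.Chars.lower (PySem.Chars.strip topic_name.toList)).foldl aStep ([], false)
  let slug := PySem.Chars.stripChars st.1 ['_']
  if slug.isEmpty then "domain_unknown" else String.ofList slug

-- ===== PORT B =====
-- the outer while-loop of B: skip a non-alnum char, or take a maximal alnum run as one word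
def altRuns : List Char → List (List Char)
  | [] => []
  | c :: rest =>
    if PySem.Chars.isalnum c then
      (c :: rest.takeWhile PySem.Chars.isalnum) :: altRuns (rest.dropWhile PySem.Chars.isalnum)
    else altRuns rest
termination_by cs => cs.length
decreasing_by
  · simpa [Nat.lt_succ_iff] using List.length_dropWhile_le PySem.Chars.isalnum rest
  · simp

def normalize_domain_id_alt (topic_name : String) : String :=
  let text := PySem.Chars.lower (PySem.Chars.strip topic_name.toList)
  let words := altRuns text
  let joined := PySem.Chars.join ['_'] words
  if joined.isEmpty then "domain_unknown" else String.ofList joined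

-- ===== PRECONDITION & SPEC =====
def Spec_normalize_domain_id (topic_name : String) (out : String) : Prop := out = normalize_domain_id_alt topic_name
instance (topic_name : String) (out : String) : Decidable (Spec_normalize_domain_id topic_name out) := by unfold Spec_normalize_domain_id; infer_instance

-- ===== CLAIM (what is proved, stated in full; the proofs are below) =====
def Claim_equal_normalize_domain_id : Prop := ∀ (topic_name : String), Dom_normalize_domain_id topic_name → Spec_normalize_domain_id topic_name (normalize_domain_id topic_name)

-- ===== LEMMAS AND PROOFS =====

-- the characters A's loop appends to `out`, as a function of the remaining input and prev_sep
def emit : List Char → Bool → List Char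
  | [], _ => []
  | c :: cs, prev =>
    if PySem.Chars.isalnum c then c :: emit cs false
    else if prev then emit cs true
    else '_' :: emit cs true

-- decomposition of emit _ false into lead pad / core / trail pad
def Ipart (cs : List Char) : List Char := PySem.Chars.join ['_'] (altRuns cs)

def Lpart (cs : List Char) : List Char :=
  match cs with
  | [] => []
  | c :: _ => if PySem.Chars.isalnum c then [] else ['_']

def Tpart (cs : List Char) : List Char :=
  match cs.getLast? with
  | none => []
  | some c => if PySem.Chars.isalnum c then [] else if altRuns cs = [] then [] else ['_']

theorem foldl_aStep (cs : List Char) : ∀ (out : List Char) (prev : Bool),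
    (cs.foldl aStep (out, prev)).1 = out ++ emit cs prev := by
  induction cs with
  | nil => intro out prev; simp [emit]
  | cons c cs ih =>
    intro out prev
    by_cases h : PySem.Chars.isalnum c = true
    · simp [aStep, h, emit, ih]
    · cases prev <;> simp [aStep, h, emit, ih]

theorem emit_run (run : List Char) (rest : List Char)
    (h : ∀ c ∈ run, PySem.Chars.isalnum c = true) :
    emit (run ++ rest) false = run ++ emit rest false := by
  induction run with
  | nil => simp
  | cons c run ih =>
    have hc := h c (by simp)
    simp only [List.cons_append, emit, hc, if_pos]
    rw [ih (fun x hx => h x (by simp [hx]))]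

theorem altRuns_nil_forall (cs : List Char) (h : altRuns cs = []) :
    ∀ c ∈ cs, PySem.Chars.isalnum c = false := by
  induction cs with
  | nil => simp
  | cons c cs ih =>
    by_cases hc : PySem.Chars.isalnum c = true
    · rw [altRuns, if_pos hc] at h; simp at h
    · rw [altRuns, if_neg hc] at h
      intro x hx
      rcases List.mem_cons.mp hx with rfl | hx
      · simpa using hc
      · exact ih h x hx

theorem altRuns_mem : ∀ (cs : List Char), ∀ r ∈ altRuns cs,
    r ≠ [] ∧ ∀ c ∈ r, PySem.Chars.isalnum c = true := by
  intro cs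
  induction hn : cs.length using Nat.strong_induction_on generalizing cs with
  | _ n ih =>
  cases cs with
  | nil => simp [altRuns]
  | cons c rest =>
    by_cases hc : PySem.Chars.isalnum c = true
    · rw [altRuns, if_pos hc]
      intro r hr
      rcases List.mem_cons.mp hr with rfl | hr
      · refine ⟨by simp, ?_⟩
        intro x hx
        rcases List.mem_cons.mp hx with rfl | hx
        · exact hc
        · exact List.mem_takeWhile_imp hx
      · have hlen : (rest.dropWhile PySem.Chars.isalnum).length < n := by
          subst hn
          simpa [Nat.lt_succ_iff] using List.length_dropWhile_le PySem.Chars.isalnum rest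
        exact ih _ hlen _ rfl r hr
    · rw [altRuns, if_neg hc]
      intro r hr
      have hlen : rest.length < n := by subst hn; simp
      exact ih _ hlen _ rfl r hr

theorem alnum_ne_underscore {c : Char} (h : PySem.Chars.isalnum c = true) : (c == '_') = false := by
  cases hb : (c == '_') with
  | false => rfl
  | true =>
    have : c = '_' := by simpa using hb
    subst this
    exact absurd h (by decide)

theorem getLast_alnum (r : List Char) (hne : r ≠ []) (h : ∀ c ∈ r, PySem.Chars.isalnum c = true) :
    ∃ b, r.getLast? = some b ∧ PySem.Chars.isalnum b = true := by
  refine ⟨r.getLast hne, List.getLast?_eq_some_getLast hne, h _ (List.getLast_mem hne)⟩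

theorem join_ends : ∀ (rs : List (List Char)), rs ≠ [] →
    (∀ r ∈ rs, r ≠ [] ∧ ∀ c ∈ r, PySem.Chars.isalnum c = true) →
    ∃ a b, (PySem.Chars.join ['_'] rs).head? = some a ∧ PySem.Chars.isalnum a = true ∧
      (PySem.Chars.join ['_'] rs).getLast? = some b ∧ PySem.Chars.isalnum b = true := by
  intro rs
  induction rs with
  | nil => simp
  | cons r rs ih =>
    intro _ h
    obtain ⟨hr, hall⟩ := h r (by simp)
    cases rs with
    | nil =>
      obtain ⟨b, hb, hbal⟩ := getLast_alnum r hr hall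
      cases r with
      | nil => exact absurd rfl hr
      | cons a r' =>
        refine ⟨a, b, ?_, hall a (by simp), ?_, hbal⟩
        · rw [PySem.Chars.join_singleton]; rfl
        · rw [PySem.Chars.join_singleton]; exact hb
    | cons r2 rs2 =>
      obtain ⟨a2, b2, ha2, ha2al, hb2, hb2al⟩ := ih (by simp) (fun x hx => h x (by simp [hx]))
      rw [PySem.Chars.join_cons_cons]
      cases r with
      | nil => exact absurd rfl hr
      | cons a r' =>
        refine ⟨a, b2, by simp, hall a (by simp), ?_, hb2al⟩
        rw [List.append_assoc, List.getLast?_append, List.getLast?_append, hb2]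
        rfl

-- main characterisation of A's emitted characters
theorem emit_decomp : ∀ (cs : List Char),
    emit cs true = Ipart cs ++ Tpart cs ∧ emit cs false = Lpart cs ++ (Ipart cs ++ Tpart cs) := by
  intro cs
  induction hn : cs.length using Nat.strong_induction_on generalizing cs with
  | _ n ih =>
  cases cs with
  | nil => simp [emit, Ipart, Lpart, Tpart, altRuns, PySem.Chars.join_nil]
  | cons c rest =>
    by_cases hc : PySem.Chars.isalnum c = true
    · -- alnum head: c :: rest = (c :: takeWhile) ++ dropWhile
      have htake : ∀ x ∈ c :: rest.takeWhile PySem.Chars.isalnum, PySem.Chars.isalnum x = true := by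
        intro x hx
        rcases List.mem_cons.mp hx with rfl | hx
        · exact hc
        · exact List.mem_takeWhile_imp hx
      have hremlen : (rest.dropWhile PySem.Chars.isalnum).length < n := by
        subst hn
        simpa [Nat.lt_succ_iff] using List.length_dropWhile_le PySem.Chars.isalnum rest
      have hruns : altRuns (c :: rest)
          = (c :: rest.takeWhile PySem.Chars.isalnum) :: altRuns (rest.dropWhile PySem.Chars.isalnum) := by
        rw [altRuns, if_pos hc]
      have hsplit : rest.takeWhile PySem.Chars.isalnum ++ rest.dropWhile PySem.Chars.isalnum = rest :=
        List.takeWhile_append_dropWhile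
      have hemitT : emit (c :: rest) true
          = (c :: rest.takeWhile PySem.Chars.isalnum) ++ emit (rest.dropWhile PySem.Chars.isalnum) false := by
        simp only [emit, hc, if_pos, List.cons_append, List.cons.injEq, true_and]
        conv_lhs => rw [← hsplit]
        rw [emit_run _ _ (fun x hx => htake x (by simp [hx]))]
      have hemitF : emit (c :: rest) false
          = (c :: rest.takeWhile PySem.Chars.isalnum) ++ emit (rest.dropWhile PySem.Chars.isalnum) false := by
        simp only [emit, hc, if_pos, List.cons_append, List.cons.injEq, true_and]
        conv_lhs => rw [← hsplit]
        rw [emit_run _ _ (fun x hx => htake x (by simp [hx]))]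
      have hL : Lpart (c :: rest) = [] := by simp [Lpart, hc]
      obtain ⟨ihT, ihF⟩ := ih _ hremlen (rest.dropWhile PySem.Chars.isalnum) rfl
      cases hre : rest.dropWhile PySem.Chars.isalnum with
      | nil =>
        -- the whole of cs is one run
        have hIcs : Ipart (c :: rest) = c :: rest.takeWhile PySem.Chars.isalnum := by
          rw [Ipart, hruns, hre, altRuns, PySem.Chars.join_singleton]
        have hlast : Tpart (c :: rest) = [] := by
          obtain ⟨b, hb, hbal⟩ := getLast_alnum _ (List.cons_ne_nil _ _) htake
          have hlast2 : (c :: rest).getLast? = some b := by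
            have : c :: rest = (c :: rest.takeWhile PySem.Chars.isalnum) ++ rest.dropWhile PySem.Chars.isalnum := by
              rw [List.cons_append, hsplit]
            rw [this, hre, List.append_nil]; exact hb
          simp [Tpart, hlast2, hbal]
        constructor
        · rw [hemitT, hre, hIcs, hlast]; simp [emit]
        · rw [hemitF, hre, hIcs, hlast, hL]; simp [emit]
      | cons d rest' =>
        have hd : PySem.Chars.isalnum d = false := by
          have h2 := List.head?_dropWhile_not PySem.Chars.isalnum rest
          rw [hre] at h2
          simpa using h2
        have hLrem : Lpart (d :: rest') = ['_'] := by simp [Lpart, hd]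
        have hlast_eq : (c :: rest).getLast? = (d :: rest').getLast? := by
          have hsplit2 : c :: rest = (c :: rest.takeWhile PySem.Chars.isalnum) ++ (d :: rest') := by
            rw [← hre, List.cons_append, hsplit]
          rw [hsplit2, List.getLast?_append]
          obtain ⟨y, hy⟩ : ∃ y, (d :: rest').getLast? = some y :=
            ⟨(d :: rest').getLast (List.cons_ne_nil _ _), List.getLast?_eq_some_getLast _⟩
          rw [hy]; rfl
        rw [hre] at ihT ihF hruns
        have hemit : emit (c :: rest) true
            = (c :: rest.takeWhile PySem.Chars.isalnum) ++ '_' :: (Ipart (d :: rest') ++ Tpart (d :: rest')) := by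
          rw [hemitT, hre, ihF, hLrem]; simp
        cases hrr : altRuns (d :: rest') with
        | nil =>
          -- no alnum after the run: the remainder is all separators
          have hIrem : Ipart (d :: rest') = [] := by rw [Ipart, hrr, PySem.Chars.join_nil]
          have hTrem : Tpart (d :: rest') = [] := by
            simp only [Tpart, hrr]
            cases h2 : (d :: rest').getLast? with
            | none => rfl
            | some x => simp
          have hlastval : ∃ x, (d :: rest').getLast? = some x ∧ PySem.Chars.isalnum x = false := by
            refine ⟨(d :: rest').getLast (List.cons_ne_nil _ _), List.getLast?_eq_some_getLast _, ?_⟩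
            exact altRuns_nil_forall _ hrr _ (List.getLast_mem _)
          obtain ⟨x, hx, hxal⟩ := hlastval
          have hIcs : Ipart (c :: rest) = c :: rest.takeWhile PySem.Chars.isalnum := by
            rw [Ipart, hruns, hrr, PySem.Chars.join_singleton]
          have hTcs : Tpart (c :: rest) = ['_'] := by
            simp [Tpart, hlast_eq.trans hx, hxal, hruns]
          constructor
          · rw [hemit, hIrem, hTrem, hIcs, hTcs]; simp
          · rw [hemitF, hre, ihF, hLrem, hIrem, hTrem, hIcs, hTcs, hL]; simp
        | cons r2 rs2 =>
          have hIcs : Ipart (c :: rest)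
              = (c :: rest.takeWhile PySem.Chars.isalnum) ++ '_' :: Ipart (d :: rest') := by
            rw [Ipart, hruns, hrr, PySem.Chars.join_cons_cons, Ipart, hrr]
            simp
          have hTcs : Tpart (c :: rest) = Tpart (d :: rest') := by
            simp only [Tpart, hlast_eq, hruns, hrr]
            cases h2 : (d :: rest').getLast? with
            | none => rfl
            | some x => simp
          constructor
          · rw [hemit, hIcs, hTcs]; simp
          · rw [hemitF, hre, ihF, hLrem, hIcs, hTcs, hL]; simp
    · -- non-alnum head
      have hruns : altRuns (c :: rest) = altRuns rest := by rw [altRuns, if_neg hc]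
      have hI : Ipart (c :: rest) = Ipart rest := by simp [Ipart, hruns]
      have hlen : rest.length < n := by subst hn; simp
      obtain ⟨ihT, ihF⟩ := ih _ hlen rest rfl
      have hcf : PySem.Chars.isalnum c = false := by simpa using hc
      have hT : Tpart (c :: rest) = Tpart rest := by
        cases hre : rest with
        | nil =>
          simp [Tpart, hcf, altRuns]
        | cons d rest' =>
          subst hre
          have hlast_eq : (c :: d :: rest').getLast? = (d :: rest').getLast? := by
            rw [show c :: d :: rest' = [c] ++ (d :: rest') by simp, List.getLast?_append]
            obtain ⟨y, hy⟩ : ∃ y, (d :: rest').getLast? = some y :=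
              ⟨(d :: rest').getLast (List.cons_ne_nil _ _), List.getLast?_eq_some_getLast _⟩
            rw [hy]; rfl
          simp only [Tpart, hlast_eq, hruns]
      constructor
      · simp only [emit, hcf]
        rw [ihT, hI, hT]
        simp
      · simp only [emit, hcf]
        rw [ihT, hI, hT]
        simp [Lpart, hcf]

theorem stripChars_pad (l t core : List Char)
    (hl : l = [] ∨ l = ['_']) (ht : t = [] ∨ t = ['_'])
    (h1 : ∃ a, core.head? = some a ∧ (a == '_') = false)
    (h2 : ∃ b, core.getLast? = some b ∧ (b == '_') = false) :
    PySem.Chars.stripChars (l ++ (core ++ t)) ['_'] = core := by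
  obtain ⟨a, ha, hau⟩ := h1
  obtain ⟨b, hb, hbu⟩ := h2
  have hau' : a ≠ '_' := by simpa using hau
  have hbu' : b ≠ '_' := by simpa using hbu
  obtain ⟨core1, hcore1⟩ : ∃ core1, core = a :: core1 := by
    cases core with
    | nil => simp at ha
    | cons x xs =>
      have : x = a := by simpa using ha
      exact ⟨xs, by rw [this]⟩
  obtain ⟨core2, hcore2⟩ : ∃ core2, core.reverse = b :: core2 := by
    have hh : core.reverse.head? = some b := by rw [List.head?_reverse]; exact hb
    cases h : core.reverse with
    | nil => rw [h] at hh; simp at hh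
    | cons x xs =>
      rw [h] at hh; simp at hh; exact ⟨xs, by rw [hh]⟩
  have hdrop1 : List.dropWhile (fun c => List.contains ['_'] c) (l ++ (core ++ t)) = core ++ t := by
    rcases hl with rfl | rfl <;>
      simp [hcore1, hau']
  have hdrop2 : List.dropWhile (fun c => List.contains ['_'] c) ((core ++ t).reverse) = core.reverse := by
    rw [List.reverse_append, hcore2]
    rcases ht with rfl | rfl <;>
      simp [hbu']
  simp only [PySem.Chars.stripChars]
  rw [hdrop1, hdrop2, List.reverse_reverse]

theorem stripChars_pads_only (x : List Char)
    (hx : x = [] ∨ x = ['_']) :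
    PySem.Chars.stripChars x ['_'] = [] := by
  rcases hx with rfl | rfl <;> simp [PySem.Chars.stripChars]

-- ===== VERDICT (by name: the statement is the Claim_ definition above) =====
theorem normalize_domain_id_spec : Claim_equal_normalize_domain_id := by
  intro s _
  unfold Spec_normalize_domain_id
  simp only [normalize_domain_id, normalize_domain_id_alt]
  set text := PySem.Chars.lower (PySem.Chars.strip s.toList) with htext
  obtain ⟨_, hF⟩ := emit_decomp text
  have hfold : (text.foldl aStep ([], false)).1 = emit text false := by
    simpa using foldl_aStep text [] false
  have hLpad : Lpart text = [] ∨ Lpart text = ['_'] := by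
    unfold Lpart; cases text with
    | nil => simp
    | cons c cs => by_cases h : PySem.Chars.isalnum c = true <;> simp [h]
  have hTpad : Tpart text = [] ∨ Tpart text = ['_'] := by
    unfold Tpart; cases h : text.getLast? with
    | none => simp
    | some c =>
      by_cases h1 : PySem.Chars.isalnum c = true
      · simp [h1]
      · by_cases h2 : altRuns text = [] <;> simp [h1, h2]
  cases hrr : altRuns text with
  | nil =>
    -- no words: both return "domain_unknown"
    have hIT : Ipart text = [] := by rw [Ipart, hrr, PySem.Chars.join_nil]
    have hTT : Tpart text = [] := by
      unfold Tpart; cases h : text.getLast? with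
      | none => rfl
      | some c => simp [hrr]
    have hstrip : PySem.Chars.stripChars (text.foldl aStep ([], false)).1 ['_'] = [] := by
      rw [hfold, hF, hIT, hTT]
      simpa using stripChars_pads_only (Lpart text) hLpad
    rw [hstrip]
    simp [PySem.Chars.join_nil]
  | cons r rs =>
    have hmem := altRuns_mem text
    rw [hrr] at hmem
    obtain ⟨a, b, ha, haal, hb, hbal⟩ :=
      join_ends (r :: rs) (by simp) hmem
    have hcore : Ipart text = PySem.Chars.join ['_'] (r :: rs) := by rw [Ipart, hrr]
    have hstrip : PySem.Chars.stripChars (text.foldl aStep ([], false)).1 ['_'] = Ipart text := by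
      rw [hfold, hF]
      exact stripChars_pad (Lpart text) (Tpart text) (Ipart text) hLpad hTpad
        ⟨a, by rw [hcore]; exact ha, alnum_ne_underscore haal⟩
        ⟨b, by rw [hcore]; exact hb, alnum_ne_underscore hbal⟩
    rw [hstrip, hcore]
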